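-- pv_equiv track=rewrite | github.com/MarkSon-42/CodingTest_Python | venv/programmersBasicTraining/코드 처리하기.py | solution
-- ===== SOURCE A (Python) =====
-- def solution(myString):
--     answer = ''
--     myString = list(myString)
--     for i in range(len(myString)):
--         if myString[i] == 'a' or myString[i] == 'A':
--             myString[i] = 'A'
--         else:
--             myString[i] = myString[i].lower()
--
--     answer = ''.join(s for s in myString)
--
--     return answer
-- ===== SOURCE B (Python) =====
-- def solution(myString):
--     return myString.lower().replace('a', 'A')
-- ===== Notes on version B (the rewrite author's own statement) =====
-- stated objective: simpler
-- what changed: Replaces the index loop with per-character branching and in-place list mutation by two whole-string passes: lowercase everything, then replace 'a' with 'A'.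
import Mathlib
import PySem

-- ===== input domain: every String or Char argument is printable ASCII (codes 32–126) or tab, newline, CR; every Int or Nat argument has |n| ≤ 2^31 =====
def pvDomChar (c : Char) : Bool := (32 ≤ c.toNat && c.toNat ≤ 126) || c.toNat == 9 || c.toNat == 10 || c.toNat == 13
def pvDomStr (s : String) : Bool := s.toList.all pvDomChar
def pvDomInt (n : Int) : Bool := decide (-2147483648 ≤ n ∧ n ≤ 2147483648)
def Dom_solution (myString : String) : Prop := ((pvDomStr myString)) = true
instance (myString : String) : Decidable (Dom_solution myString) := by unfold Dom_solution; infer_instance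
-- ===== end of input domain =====

-- B replaces A's per-index loop (branch + in-place list assignment) by two whole-string
-- passes: lowercase everything, then replace 'a' with 'A'. Objective: simpler.

-- ===== PORT A =====
-- the loop body: read myString[i], write back 'A' or that character's lowercase
def solutionStep (l : List Char) (i : Int) : List Char :=
  match PySem.List.pyGet? l i with
  | some c =>
      if c = 'a' ∨ c = 'A' then l.set i.toNat 'A'
      else l.set i.toNat (PySem.Chars.lowerChar c)   -- s.lower() on a 1-char string
  | none => l   -- unreachable: i ranges over valid indices

def solution (myString : String) : String :=
  let cs := myString.toList                                            -- myString = list(myString)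
  let cs2 := (PySem.List.pyRange 0 cs.length).foldl solutionStep cs    -- for i in range(len(myString)): …
  String.ofList cs2                                                    -- answer = ''.join(s for s in myString)

-- ===== PORT B =====
def solution_alt (myString : String) : String :=
  PySem.Str.replace (PySem.Str.lower myString) "a" "A"

-- ===== PRECONDITION & SPEC =====
def Spec_solution (myString : String) (out : String) : Prop := out = solution_alt myString
instance (myString : String) (out : String) : Decidable (Spec_solution myString out) := by unfold Spec_solution; infer_instance

-- ===== CLAIM (what is proved, stated in full; the proofs are below) =====
def Claim_equal_solution : Prop := ∀ (myString : String), Dom_solution myString → Spec_solution myString (solution myString)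

-- ===== LEMMAS AND PROOFS =====

-- the value A writes at a position holding c
def pvF (c : Char) : Char :=
  if c = 'a' ∨ c = 'A' then 'A' else PySem.Chars.lowerChar c

lemma solutionStep_set (l : List Char) (k : Nat) (hk : k < l.length) :
    solutionStep l (k : Int) = l.set k (pvF l[k]) := by
  simp only [solutionStep, PySem.List.pyGet?_natCast, List.getElem?_eq_getElem hk,
    Int.toNat_natCast, pvF]
  split <;> rfl

-- A's loop maps pvF over the suffix from index k
lemma pv_take_app (k : Nat) (t r : List Char) (x : Char) (ht : t.length = k) :
    (t ++ x :: r).take (k + 1) = t ++ [x] := by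
  subst ht; simp [List.take_append]

lemma pv_drop_app (k : Nat) (t r : List Char) (x : Char) (ht : t.length = k) :
    (t ++ x :: r).drop (k + 1) = r := by
  subst ht; simp [List.drop_append]

lemma solution_loop (d : Nat) : ∀ (k : Nat) (cs : List Char), k + d = cs.length →
    (PySem.List.pyRange (k : Int) (cs.length : Int)).foldl solutionStep cs
      = cs.take k ++ (cs.drop k).map pvF := by
  induction d with
  | zero =>
    intro k cs h
    have hnil : (PySem.List.pyRange (k : Int) (cs.length : Int)) = [] := by
      simp [PySem.List.pyRange, ← h]
    rw [hnil, List.foldl_nil, List.take_of_length_le (by omega),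
        List.drop_eq_nil_of_le (by omega)]
    simp
  | succ d ih =>
    intro k cs h
    have hk : k < cs.length := by omega
    rw [PySem.List.pyRange_one_cons (by exact_mod_cast hk)]
    have hcast : ((k : Int) + 1) = ((k + 1 : Nat) : Int) := by push_cast; ring
    rw [List.foldl_cons, solutionStep_set cs k hk, hcast]
    have hlen : (cs.set k (pvF cs[k])).length = cs.length := by simp
    rw [← hlen, ih (k + 1) _ (by omega)]
    have hset : cs.set k (pvF cs[k]) = cs.take k ++ pvF cs[k] :: cs.drop (k + 1) := by
      rw [List.set_eq_take_append_cons_drop, if_pos hk]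
    have ht : (cs.take k).length = k := by simp [Nat.le_of_lt hk]
    rw [hset, pv_take_app k _ _ _ ht, pv_drop_app k _ _ _ ht,
        List.drop_eq_getElem_cons hk]
    simp only [List.map_cons, List.append_assoc, List.cons_append, List.nil_append]

-- the effect of replace 'a'→'A' after lowerChar equals pvF
lemma pvF_lower (c : Char) :
    (if PySem.Chars.lowerChar c = 'a' then 'A' else PySem.Chars.lowerChar c) = pvF c := by
  unfold pvF
  by_cases ha : c = 'a'
  · subst ha; decide
  by_cases hA : c = 'A'
  · subst hA; decide
  have hne : ¬ (c = 'a' ∨ c = 'A') := by tauto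
  rw [if_neg hne]
  have hl : PySem.Chars.lowerChar c ≠ 'a' := by
    unfold PySem.Chars.lowerChar PySem.Chars.isupper
    split
    · rename_i h
      have h1 : 'A' ≤ c ∧ c ≤ 'Z' := by
        simpa [Bool.and_eq_true, decide_eq_true_iff] using h
      have hlo : 65 ≤ c.toNat := h1.1
      have hhi : c.toNat ≤ 90 := h1.2
      have hnum : c.toNat ≠ 65 := by
        intro h65
        have h2 : c.val.toNat = ((65 : UInt32)).toNat := h65
        exact hA (Char.ext (UInt32.toNat_inj.mp h2))
      intro heq
      have h97 : (Char.ofNat (c.toNat + 32)).toNat = 97 := by rw [heq]; decide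
      rw [Char.toNat_ofNat, if_pos (by constructor; omega)] at h97
      omega
    · exact ha
  rw [if_neg hl]

-- replace with a single-char pattern is a pointwise map (fuel-indexed inner loop)
lemma replace_go_map (fuel : Nat) : ∀ (l acc : List Char), l.length ≤ fuel →
    PySem.Chars.replace.go ['a'] ['A'] fuel l acc
      = acc.reverse ++ l.map (fun c => if c = 'a' then 'A' else c) := by
  induction fuel with
  | zero =>
    intro l acc h
    have : l = [] := List.eq_nil_of_length_eq_zero (Nat.le_zero.mp h)
    subst this
    simp [PySem.Chars.replace.go]
  | succ fuel ih =>
    intro l acc h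
    match l with
    | [] => simp [PySem.Chars.replace.go]
    | c :: t =>
      by_cases hc : c = 'a'
      · subst hc
        have hpre : List.isPrefixOf ['a'] ('a' :: t) = true := by
          simp [List.isPrefixOf]
        rw [PySem.Chars.replace.go, if_pos hpre]
        show PySem.Chars.replace.go ['a'] ['A'] fuel t ('A' :: acc) = _
        rw [ih t ('A' :: acc) (by simpa using Nat.le_of_succ_le_succ h)]
        simp
      · have hpre : List.isPrefixOf ['a'] (c :: t) = false := by
          simp [List.isPrefixOf]
          exact fun h' => absurd h'.symm hc
        rw [PySem.Chars.replace.go, if_neg (by simp [hpre])]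
        rw [ih t (c :: acc) (by simpa using Nat.le_of_succ_le_succ h)]
        simp [hc]

lemma replace_map (l : List Char) :
    PySem.Chars.replace l ['a'] ['A'] = l.map (fun c => if c = 'a' then 'A' else c) := by
  rw [PySem.Chars.replace]
  rw [if_neg (by simp)]
  simpa using replace_go_map l.length l [] (Nat.le_refl _)

-- ===== VERDICT (by name: the statement is the Claim_ definition above) =====
theorem solution_spec : Claim_equal_solution := by
  intro s _
  unfold Spec_solution solution solution_alt
  have h1 : (PySem.Str.replace (PySem.Str.lower s) "a" "A")
      = String.ofList (PySem.Chars.replace (PySem.Chars.lower s.toList) ['a'] ['A']) := by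
    simp [PySem.Str.replace, PySem.Str.toList_lower]
  rw [h1, replace_map]
  have h2 : (PySem.Chars.lower s.toList).map (fun c => if c = 'a' then 'A' else c)
      = s.toList.map pvF := by
    simp only [PySem.Chars.lower, List.map_map]
    exact List.map_congr_left (fun c _ => pvF_lower c)
  rw [h2]
  have h3 := solution_loop s.toList.length 0 s.toList (by omega)
  simp only [Nat.cast_zero] at h3
  simp only [h3]
  simp
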